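-- pv_equiv track=rewrite | github.com/x5px/matura | Arkusze/2022/Zadanie/Zadanie 4/4_3.py | trojka
-- ===== SOURCE A (Python) =====
-- def trojka(x, y, z, a=None, b=None):
--     if a is not None: # piątki
--         tab = [x, y, z, a, b]
--         if len(list(set(tab))) != 5:
--             return False
--         else:
--             for i in range(1, 5):
--                 if(tab[i] % tab[i-1] != 0):
--                     return False
--         return True
--     else:
--         return x != y and x != z and y != z and y%x==0 and z%y==0 # trójki
-- ===== SOURCE B (Python) =====
-- def _distinct(t):
--     # head not in tail, recursively
--     return not t or (t[0] not in t[1:] and _distinct(t[1:]))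
--
--
-- def _chain(t):
--     # each element divisible by its predecessor, recursively
--     return len(t) < 2 or (t[1] % t[0] == 0 and _chain(t[1:]))
--
--
-- def trojka(x, y, z, a=None, b=None):
--     tab = [x, y, z] if a is None else [x, y, z, a, b]
--     return _distinct(tab) and _chain(tab)
-- ===== Notes on version B (the rewrite author's own statement) =====
-- stated objective: alternative
-- what changed: Replaces A's two hand-written branches (set-size check plus index loop for 5 args, an inlined boolean chain for 3 args) by one path built from two structurally recursive helpers: _distinct (head not in tail) and _chain (consecutive divisibility), with no set and no index arithmetic.
import Mathlib
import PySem

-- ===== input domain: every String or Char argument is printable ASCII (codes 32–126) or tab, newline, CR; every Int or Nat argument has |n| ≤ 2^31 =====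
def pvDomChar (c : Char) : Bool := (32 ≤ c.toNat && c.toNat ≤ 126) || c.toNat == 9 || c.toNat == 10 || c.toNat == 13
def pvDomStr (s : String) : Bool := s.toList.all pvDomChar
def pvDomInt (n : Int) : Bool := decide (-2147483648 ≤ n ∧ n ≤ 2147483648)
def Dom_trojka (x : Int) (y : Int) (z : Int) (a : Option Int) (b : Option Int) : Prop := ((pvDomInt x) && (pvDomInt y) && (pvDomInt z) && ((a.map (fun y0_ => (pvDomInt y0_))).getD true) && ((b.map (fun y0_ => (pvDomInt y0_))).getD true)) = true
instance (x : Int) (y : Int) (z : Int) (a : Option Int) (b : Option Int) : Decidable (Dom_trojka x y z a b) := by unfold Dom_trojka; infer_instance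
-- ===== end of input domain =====

-- B replaces A's two hand-written branches by one path built from two recursive helpers
-- (head-not-in-tail distinctness, consecutive-divisibility chain); same cost, alternative structure.

-- ===== PORT A =====
-- the 5-case 'for i in range(1,5): if tab[i] % tab[i-1] != 0: return False', early return as recursion
def trojkaLoopA (tab : List Int) : List Int → Bool
  | [] => true
  | i :: rest =>
      if PySem.Int.mod (PySem.List.pyGetD tab i 0) (PySem.List.pyGetD tab (i - 1) 0) ≠ 0 then false
      else trojkaLoopA tab rest

def trojka (x : Int) (y : Int) (z : Int) (a : Option Int) (b : Option Int) : Bool :=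
  match a with
  | some av =>
      -- b = none only matters outside Pre_ (Python raises there unless the chain stops first); getD 0 is a placeholder
      let tab : List Int := [x, y, z, av, b.getD 0]
      if (PySem.Set.ofList tab).length ≠ 5 then false
      else trojkaLoopA tab (PySem.List.pyRange 1 5 1)
  | none =>
      decide (x ≠ y) && decide (x ≠ z) && decide (y ≠ z)
        && (PySem.Int.mod y x == 0) && (PySem.Int.mod z y == 0)

-- ===== PORT B =====
-- '_distinct': head not in tail, recursively
def bDistinct : List Int → Bool
  | [] => true
  | t :: rest => !(rest.contains t) && bDistinct rest

-- '_chain': each element divisible by its predecessor, recursively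
def bChain : List Int → Bool
  | [] => true
  | [_] => true
  | p :: q :: rest => (PySem.Int.mod q p == 0) && bChain (q :: rest)

def trojka_alt (x : Int) (y : Int) (z : Int) (a : Option Int) (b : Option Int) : Bool :=
  let tab : List Int := match a with | none => [x, y, z] | some av => [x, y, z, av, b.getD 0]
  bDistinct tab && bChain tab

-- ===== PRECONDITION & SPEC =====
-- Pre_ excludes exactly the inputs where Python A raises (Python B raises on the same inputs):
-- the elements are pairwise distinct (so the duplicate check does not short-circuit) and the
-- divisibility chain reaches a zero divisor (ZeroDivisionError) or, when a is given without b,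
-- reaches None % a (TypeError). pvRaise_* below spells out that reach condition per arity.
def pvRaise3 (x : Int) (y : Int) (z : Int) : Bool :=
  (x != y && x != z && y != z) && (x == 0 || (PySem.Int.mod y x == 0 && y == 0))
def pvRaise4 (x : Int) (y : Int) (z : Int) (av : Int) : Bool :=
  (x != y && x != z && x != av && y != z && y != av && z != av) &&
  (x == 0 || (PySem.Int.mod y x == 0 && (y == 0 || (PySem.Int.mod z y == 0 && (z == 0 || PySem.Int.mod av z == 0)))))
def pvRaise5 (x : Int) (y : Int) (z : Int) (av : Int) (bv : Int) : Bool :=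
  (x != y && x != z && x != av && x != bv && y != z && y != av && y != bv && z != av && z != bv && av != bv) &&
  (x == 0 || (PySem.Int.mod y x == 0 && (y == 0 || (PySem.Int.mod z y == 0 && (z == 0 || (PySem.Int.mod av z == 0 && av == 0))))))
def Pre_trojka (x : Int) (y : Int) (z : Int) (a : Option Int) (b : Option Int) : Prop :=
  (a = none → pvRaise3 x y z = false) ∧
  (a.isSome → b = none → pvRaise4 x y z (a.getD 0) = false) ∧
  (a.isSome → b.isSome → pvRaise5 x y z (a.getD 0) (b.getD 0) = false)
instance (x : Int) (y : Int) (z : Int) (a : Option Int) (b : Option Int) : Decidable (Pre_trojka x y z a b) := by unfold Pre_trojka; infer_instance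

def pvWitness_trojka : Int × Int × Int × Option Int × Option Int := (1, 2, 6, none, none)

def Spec_trojka (x : Int) (y : Int) (z : Int) (a : Option Int) (b : Option Int) (out : Bool) : Prop := out = trojka_alt x y z a b
instance (x : Int) (y : Int) (z : Int) (a : Option Int) (b : Option Int) (out : Bool) : Decidable (Spec_trojka x y z a b out) := by unfold Spec_trojka; infer_instance

-- ===== CLAIM (what is proved, stated in full; the proofs are below) =====
def Claim_equal_trojka : Prop := ∀ (x : Int) (y : Int) (z : Int) (a : Option Int) (b : Option Int), Dom_trojka x y z a b → Pre_trojka x y z a b → Spec_trojka x y z a b (trojka x y z a b)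

-- ===== LEMMAS AND PROOFS =====

-- B's distinctness helper decides Nodup
theorem bDistinct_eq_nodup (l : List Int) : bDistinct l = true ↔ l.Nodup := by
  induction l with
  | nil => simp [bDistinct]
  | cons t rest ih => simp [bDistinct, ih, List.nodup_cons]

-- A's set-size check decides Nodup
theorem ofList_length_eq (l : List Int) : (PySem.Set.ofList l).length = l.length ↔ l.Nodup := by
  induction l using List.reverseRecOn with
  | nil => simp [PySem.Set.ofList]
  | append_singleton l x ih =>
    have hof : PySem.Set.ofList (l ++ [x]) = PySem.Set.add (PySem.Set.ofList l) x := by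
      simp [PySem.Set.ofList_eq_foldl, List.foldl_append]
    have hle : (PySem.Set.ofList l).length ≤ l.length := by
      clear ih hof
      induction l using List.reverseRecOn with
      | nil => simp [PySem.Set.ofList]
      | append_singleton l x ih =>
        have : PySem.Set.ofList (l ++ [x]) = PySem.Set.add (PySem.Set.ofList l) x := by
          simp [PySem.Set.ofList_eq_foldl, List.foldl_append]
        rw [this]
        unfold PySem.Set.add
        split
        · simpa using Nat.le_succ_of_le ih
        · simpa using ih
    have hmem : ∀ y : Int, y ∈ PySem.Set.ofList l ↔ y ∈ l := fun y => PySem.Set.mem_ofList _ _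
    rw [hof]
    unfold PySem.Set.add
    by_cases hx : x ∈ l
    · have hc : (PySem.Set.ofList l).contains x = true := by
        simp [hmem x |>.mpr hx]
      simp only [hc]
      constructor
      · intro h
        exfalso
        simp [List.length_append] at h
        omega
      · intro h
        exact absurd hx (by simp [List.nodup_append] at h; tauto)
    · have hc : ¬ (PySem.Set.ofList l).contains x = true := by
        simp [hmem x, hx]
      simp only [hc, if_neg, Bool.not_eq_true]
      simp only [List.length_append, List.length_cons, List.length_nil]
      constructor
      · intro h
        have hnl : l.Nodup := ih.mp (by omega)
        simp only [List.nodup_append, List.nodup_singleton, true_and, hnl]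
        intro a ha b hb
        simp only [List.mem_singleton] at hb
        exact fun heq => hx (by rw [heq, hb] at ha; exact ha)
      · intro h
        have hnl : l.Nodup := by simp [List.nodup_append] at h; tauto
        have := ih.mpr hnl
        omega

-- ===== VERDICT (by name: the statement is the Claim_ definition above) =====
theorem trojka_spec : Claim_equal_trojka := by
  intro x y z a b _ hpre
  unfold Spec_trojka trojka trojka_alt
  cases a with
  | none =>
      simp only []
      by_cases hxy : x = y <;> by_cases hxz : x = z <;> by_cases hyz : y = z <;>
        simp_all [bDistinct, bChain]
  | some av =>
      clear hpre
      generalize b.getD 0 = bv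
      have hr : PySem.List.pyRange 1 5 1 = [1, 2, 3, 4] := by decide
      simp only [hr]
      by_cases hd : ([x, y, z, av, bv] : List Int).Nodup
      · have h5 : (PySem.Set.ofList [x, y, z, av, bv]).length = 5 := by
          have := (ofList_length_eq [x, y, z, av, bv]).mpr hd
          simpa using this
        have hb : bDistinct [x, y, z, av, bv] = true := (bDistinct_eq_nodup _).mpr hd
        simp only [h5, hb, if_neg (by omega : ¬ (5 : Nat) ≠ 5), Bool.true_and]
        simp [trojkaLoopA, bChain, PySem.List.pyGetD, PySem.List.pyGet?, PySem.List.pyIdx?]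
        by_cases h1 : PySem.Int.mod y x = 0 <;> by_cases h2 : PySem.Int.mod z y = 0 <;>
        by_cases h3 : PySem.Int.mod av z = 0 <;> by_cases h4 : PySem.Int.mod bv av = 0 <;>
          simp_all
      · have h5 : (PySem.Set.ofList [x, y, z, av, bv]).length ≠ 5 := by
          intro h
          exact hd ((ofList_length_eq [x, y, z, av, bv]).mp (by simpa using h))
        have hb : bDistinct [x, y, z, av, bv] = false := by
          cases hEq : bDistinct [x, y, z, av, bv]
          · rfl
          · exact absurd ((bDistinct_eq_nodup _).mp hEq) hd
        simp [h5, hb]
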